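-- pv_equiv track=rewrite | github.com/Wiinning/AI-final-project | skincare_engine.py | check_conflicts
-- ===== SOURCE A (Python) =====
-- def check_conflicts(ingredient_list, conflict_pairs):
--     out = []
--     for i in range(len(ingredient_list)):
--         for j in range(i + 1, len(ingredient_list)):
--             pair = tuple(sorted([ingredient_list[i], ingredient_list[j]]))
--             if pair in conflict_pairs:
--                 out.append(f"{ingredient_list[i]} + {ingredient_list[j]}")
--     return out
-- ===== SOURCE B (Python) =====
-- def check_conflicts(ingredient_list, conflict_pairs):
--     # Index each ingredient to its (sorted) list of positions, walk the
--     # conflict pairs once, collect matching index pairs, sort by (i, j).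
--     pos = {}
--     for idx, ing in enumerate(ingredient_list):
--         pos.setdefault(ing, []).append(idx)
--     uniq = list(dict.fromkeys(p for p in conflict_pairs if p[0] <= p[1]))
--     hits = []
--     for a, b in uniq:
--         if a == b:
--             ps = pos.get(a, [])
--             hits.extend((i, j) for k, i in enumerate(ps) for j in ps[k + 1:])
--         else:
--             hits.extend((min(i, j), max(i, j))
--                         for i in pos.get(a, []) for j in pos.get(b, []))
--     hits.sort()
--     return [f"{ingredient_list[i]} + {ingredient_list[j]}" for i, j in hits]
-- ===== Notes on version B (the rewrite author's own statement) =====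
-- stated objective: faster
-- what changed: Replaces the O(n^2) scan over all ingredient pairs (with a list-membership test per pair) by indexing ingredient positions once, iterating the deduplicated conflict pairs to collect matching index pairs, and sorting them by (i, j) to restore A's output order.
import Mathlib
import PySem

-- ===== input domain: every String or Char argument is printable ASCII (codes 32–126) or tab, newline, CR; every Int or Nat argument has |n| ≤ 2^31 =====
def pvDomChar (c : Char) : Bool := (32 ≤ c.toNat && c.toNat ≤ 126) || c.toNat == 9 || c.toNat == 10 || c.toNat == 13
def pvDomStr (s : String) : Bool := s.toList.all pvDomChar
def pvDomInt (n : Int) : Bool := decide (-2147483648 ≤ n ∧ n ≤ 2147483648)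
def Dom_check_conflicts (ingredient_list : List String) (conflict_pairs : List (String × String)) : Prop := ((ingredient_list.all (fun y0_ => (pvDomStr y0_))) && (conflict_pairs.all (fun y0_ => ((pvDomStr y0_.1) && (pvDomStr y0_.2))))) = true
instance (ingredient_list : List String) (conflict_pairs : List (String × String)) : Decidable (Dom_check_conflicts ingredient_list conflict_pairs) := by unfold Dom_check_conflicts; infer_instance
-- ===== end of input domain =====

-- B replaces A's O(n^2) all-pairs scan by indexing ingredient positions, walking the
-- deduplicated conflict pairs to collect matching index pairs, and sorting them by (i, j).


-- ===== PORT A =====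
-- tuple(sorted([x, y])) on a two-element list: stable ascending sort (Python str '<' is Lean's '<' on String)
def pvSortedPair (x y : String) : String × String := if x ≤ y then (x, y) else (y, x)
-- f"{x} + {y}" built on the List Char level (kernel-transparent; exact for string concatenation)
def pvFmt (x y : String) : String := String.ofList (x.toList ++ (' ' :: '+' :: ' ' :: []) ++ y.toList)

-- literal port of A: for i in range(n): for j in range(i+1, n): if sorted pair in conflict_pairs: append
-- (ingredient_list[i] with i drawn from range(len(...)) is always in range, so pyGetD with default "" is exact)
def check_conflicts (ingredient_list : List String) (conflict_pairs : List (String × String)) : List String :=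
  (PySem.List.pyRange 0 ingredient_list.length).foldl (fun out i =>
    (PySem.List.pyRange (i + 1) ingredient_list.length).foldl (fun out j =>
      if conflict_pairs.contains
          (pvSortedPair (PySem.List.pyGetD ingredient_list i "") (PySem.List.pyGetD ingredient_list j "")) then
        out ++ [pvFmt (PySem.List.pyGetD ingredient_list i "") (PySem.List.pyGetD ingredient_list j "")]
      else out) out) []

-- ===== PORT B =====
-- literal port of Source B: position index, dedup of the (a <= b) conflict pairs, match collection, lex sort.
def check_conflicts_alt (ingredient_list : List String) (conflict_pairs : List (String × String)) : List String :=
  -- pos = {}; for idx, ing in enumerate(...): pos.setdefault(ing, []).append(idx)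
  let pos : PySem.Dict String (List Int) :=
    (PySem.List.enumerate ingredient_list 0).foldl
      (fun d q => d.modify q.2 [] (fun l => l ++ [q.1])) PySem.Dict.empty
  -- uniq = list(dict.fromkeys(p for p in conflict_pairs if p[0] <= p[1]))
  let uniq := PySem.List.dedup (conflict_pairs.filter (fun p => p.1 ≤ p.2))
  -- hits collection loop (extend = append of the generator's list)
  let hits : List (Int × Int) :=
    uniq.foldl (fun hits p =>
      if p.1 == p.2 then
        let ps := pos.getD p.1 []
        hits ++ (PySem.List.enumerate ps 0).flatMap (fun ki =>
          (PySem.List.slice ps (some (ki.1 + 1)) none).map (fun j => (ki.2, j)))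
      else
        hits ++ (pos.getD p.1 []).flatMap (fun i =>
          (pos.getD p.2 []).map (fun j => (min i j, max i j)))) []
  -- hits.sort(): Python tuple comparison is lexicographic, i.e. '<' on Lex (Int × Int)
  let sortedHits := PySem.List.sorted hits (fun q => (toLex q : Lex (Int × Int)))
  sortedHits.map (fun q =>
    pvFmt (PySem.List.pyGetD ingredient_list q.1 "") (PySem.List.pyGetD ingredient_list q.2 ""))

-- ===== PRECONDITION & SPEC =====
def Spec_check_conflicts (ingredient_list : List String) (conflict_pairs : List (String × String)) (out : List String) : Prop := out = check_conflicts_alt ingredient_list conflict_pairs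
instance (ingredient_list : List String) (conflict_pairs : List (String × String)) (out : List String) : Decidable (Spec_check_conflicts ingredient_list conflict_pairs out) := by unfold Spec_check_conflicts; infer_instance

-- ===== CLAIM (what is proved, stated in full; the proofs are below) =====
def Claim_equal_check_conflicts : Prop := ∀ (ingredient_list : List String) (conflict_pairs : List (String × String)), Dom_check_conflicts ingredient_list conflict_pairs → Spec_check_conflicts ingredient_list conflict_pairs (check_conflicts ingredient_list conflict_pairs)

-- ===== LEMMAS AND PROOFS =====

-- proof-side abbreviations
def pvGet (xs : List String) (i : Int) : String := PySem.List.pyGetD xs i ""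
def pvK (xs : List String) (q : Int × Int) : String × String := pvSortedPair (pvGet xs q.1) (pvGet xs q.2)
def pvP (xs : List String) (cps : List (String × String)) (q : Int × Int) : Bool := cps.contains (pvK xs q)
def pvAP (n : Nat) : List (Int × Int) :=
  (PySem.List.pyRange 0 n).flatMap (fun i => (PySem.List.pyRange (i + 1) n).map (fun j => (i, j)))
def pvF (xs : List String) (cps : List (String × String)) : List (Int × Int) :=
  (pvAP xs.length).filter (pvP xs cps)
def pvFmtQ (xs : List String) (q : Int × Int) : String := pvFmt (pvGet xs q.1) (pvGet xs q.2)
def pvPosL (xs : List String) (a : String) : List Int :=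
  ((List.range xs.length).filter (fun k => xs.getD k "" == a)).map (fun k => Int.ofNat k)
def pvCombos (ps : List Int) : List (Int × Int) :=
  (List.range ps.length).flatMap (fun k => (ps.drop (k + 1)).map (fun j => (ps.getD k 0, j)))
def pvCross (pa pb : List Int) : List (Int × Int) :=
  pa.flatMap (fun i => pb.map (fun j => (min i j, max i j)))
def pvContrib (xs : List String) (p : String × String) : List (Int × Int) :=
  if p.1 == p.2 then pvCombos (pvPosL xs p.1) else pvCross (pvPosL xs p.1) (pvPosL xs p.2)
def pvUniq (cps : List (String × String)) : List (String × String) :=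
  PySem.List.dedup (cps.filter (fun p => p.1 ≤ p.2))
def pvHits (xs : List String) (cps : List (String × String)) : List (Int × Int) :=
  (pvUniq cps).flatMap (pvContrib xs)

-- enumerate characterised over range (any default, every access is in range)
lemma pvEnum_eq {α : Type} (d : α) : ∀ (xs : List α) (s : Int),
    PySem.List.enumerate xs s = (List.range xs.length).map (fun (k : Nat) => (s + (k : Int), xs.getD k d)) := by
  intro xs
  induction xs with
  | nil => intro s; rfl
  | cons x t ih =>
    intro s
    show (s, x) :: PySem.List.enumerate t (s + 1) = _
    rw [ih (s + 1)]
    simp only [List.length_cons, List.range_succ_eq_map, List.map_cons, List.map_map]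
    refine congrArg₂ _ (by simp) ?_
    apply List.map_congr_left; intro k _
    simp [Function.comp]
    ring



lemma pvMem_pvPosL' (xs : List String) (a : String) (i : Int) :
    i ∈ pvPosL xs a ↔ 0 ≤ i ∧ i < (xs.length : Int) ∧ pvGet xs i = a := by
  unfold pvPosL pvGet
  simp only [List.mem_map, List.mem_filter, List.mem_range, beq_iff_eq, Int.ofNat_eq_natCast]
  constructor
  · rintro ⟨k, ⟨hk, hka⟩, rfl⟩
    refine ⟨by positivity, by exact_mod_cast hk, ?_⟩
    rw [PySem.List.pyGetD_natCast]; exact hka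
  · rintro ⟨h0, hn, hget⟩
    rw [PySem.List.pyGetD_of_nonneg _ _ h0] at hget
    exact ⟨i.toNat, ⟨by omega, hget⟩, by omega⟩

lemma pvPairwise_pvPosL' (xs : List String) (a : String) : (pvPosL xs a).Pairwise (· < ·) := by
  unfold pvPosL
  refine List.pairwise_map.mpr (List.Pairwise.imp ?_ (List.Pairwise.sublist List.filter_sublist List.pairwise_lt_range))
  intro a b h; simp only [Int.ofNat_eq_natCast]; exact_mod_cast h

lemma pvCombos_cons' (x : Int) (t : List Int) :
    pvCombos (x :: t) = t.map (fun j => (x, j)) ++ pvCombos t := by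
  unfold pvCombos
  simp only [List.length_cons, List.range_succ_eq_map, List.flatMap_cons, List.flatMap_map]
  simp [List.drop_succ_cons]

lemma pvMem_pvCombos' (ps : List Int) (h : ps.Pairwise (· < ·)) (q : Int × Int) :
    q ∈ pvCombos ps ↔ q.1 ∈ ps ∧ q.2 ∈ ps ∧ q.1 < q.2 := by
  induction ps with
  | nil => simp [pvCombos]
  | cons x t ih =>
    rw [List.pairwise_cons] at h
    obtain ⟨hx, ht⟩ := h
    rw [pvCombos_cons']
    simp only [List.mem_append, List.mem_map, List.mem_cons, ih ht]
    constructor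
    · rintro (⟨j, hj, rfl⟩ | ⟨h1, h2, h3⟩)
      · exact ⟨Or.inl rfl, Or.inr hj, hx j hj⟩
      · exact ⟨Or.inr h1, Or.inr h2, h3⟩
    · rintro ⟨h1 | h1, h2 | h2, h3⟩
      · omega
      · exact Or.inl ⟨q.2, h2, by rw [← h1]⟩
      · have hxx := hx q.1 h1; omega
      · exact Or.inr ⟨h1, h2, h3⟩

lemma pvNodup_pvCombos' (ps : List Int) (h : ps.Pairwise (· < ·)) : (pvCombos ps).Nodup := by
  induction ps with
  | nil => simp [pvCombos]
  | cons x t ih =>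
    rw [List.pairwise_cons] at h
    obtain ⟨hx, ht⟩ := h
    rw [pvCombos_cons']
    refine List.Nodup.append ?_ (ih ht) ?_
    · exact List.Nodup.map (fun a b e => by simpa using e) (ht.imp fun h => ne_of_lt h)
    · intro q hq1 hq2
      obtain ⟨j, _, rfl⟩ := List.mem_map.mp hq1
      have hmem := ((pvMem_pvCombos' t ht _).mp hq2).1
      have h2 := hx _ hmem
      simp at h2

lemma pvNodup_pvCross' (pa pb : List Int) (hpa : pa.Nodup) (hpb : pb.Nodup)
    (hd : ∀ i ∈ pa, i ∉ pb) : (pvCross pa pb).Nodup := by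
  unfold pvCross
  rw [List.nodup_flatMap]
  constructor
  · intro i _
    refine List.Nodup.map ?_ hpb
    intro j1 j2 e
    have e1 := congrArg (fun q : Int × Int => q.1 + q.2) e
    simp only [min_add_max] at e1
    omega
  · refine List.Pairwise.imp_of_mem ?_ hpa
    intro i1 i2 h1 h2 hne q hq1 hq2
    obtain ⟨j1, hj1, rfl⟩ := List.mem_map.mp hq1
    obtain ⟨j2, hj2, e⟩ := List.mem_map.mp hq2
    have e1 : min i2 j2 = min i1 j1 := congrArg Prod.fst e
    have e2 : max i2 j2 = max i1 j1 := congrArg Prod.snd e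
    have : i1 = i2 ∨ i1 = j2 := by omega
    rcases this with h | h
    · exact hne h
    · exact hd i1 h1 (h ▸ hj2)

lemma pvSortedPair_self (a : String) : pvSortedPair a a = (a, a) := by
  simp [pvSortedPair]


lemma pvSortedPair_fst_le_snd' (x y : String) : (pvSortedPair x y).1 ≤ (pvSortedPair x y).2 := by
  unfold pvSortedPair; split_ifs with h
  · exact h
  · exact le_of_lt (lt_of_not_ge h)

lemma pvNodup_pvPosL' (xs : List String) (a : String) : (pvPosL xs a).Nodup :=
  (pvPairwise_pvPosL' xs a).imp (fun h => ne_of_lt h)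

lemma pvMem_pvUniq' (cps : List (String × String)) (p : String × String) :
    p ∈ pvUniq cps ↔ p ∈ cps ∧ p.1 ≤ p.2 := by
  unfold pvUniq
  rw [PySem.List.mem_dedup, List.mem_filter]
  simp

lemma pvKey_of_contrib' (xs : List String) (p : String × String) (hle : p.1 ≤ p.2)
    (q : Int × Int) (hq : q ∈ pvContrib xs p) :
    pvK xs q = p ∧ 0 ≤ q.1 ∧ q.1 < q.2 ∧ q.2 < (xs.length : Int) := by
  unfold pvContrib at hq
  by_cases hb : p.1 = p.2
  · simp only [hb, beq_self_eq_true, if_true] at hq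
    rw [pvMem_pvCombos' _ (pvPairwise_pvPosL' xs p.2)] at hq
    obtain ⟨h1, h2, h3⟩ := hq
    rw [pvMem_pvPosL'] at h1 h2
    refine ⟨?_, h1.1, h3, h2.2.1⟩
    show pvSortedPair (pvGet xs q.1) (pvGet xs q.2) = p
    rw [h1.2.2, h2.2.2, pvSortedPair_self, Prod.ext_iff]
    exact ⟨hb.symm, rfl⟩
  · simp only [beq_iff_eq, hb, if_false] at hq
    unfold pvCross at hq
    obtain ⟨i, hi, hq⟩ := List.mem_flatMap.mp hq
    obtain ⟨j, hj, rfl⟩ := List.mem_map.mp hq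
    rw [pvMem_pvPosL'] at hi hj
    have hij : i ≠ j := fun e => hb (by rw [← hi.2.2, ← hj.2.2, e])
    have hlt : p.1 < p.2 := lt_of_le_of_ne hle hb
    refine ⟨?_, by omega, by omega, by omega⟩
    show pvSortedPair (pvGet xs (min i j)) (pvGet xs (max i j)) = p
    rcases lt_or_gt_of_ne hij with h | h
    · rw [min_eq_left h.le, max_eq_right h.le, hi.2.2, hj.2.2]
      unfold pvSortedPair
      rw [if_pos hle]
    · rw [min_eq_right h.le, max_eq_left h.le, hi.2.2, hj.2.2]
      unfold pvSortedPair
      rw [if_neg (not_le.mpr hlt)]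

lemma pvMem_contrib_self' (xs : List String) (q : Int × Int)
    (h0 : 0 ≤ q.1) (h1 : q.1 < q.2) (h2 : q.2 < (xs.length : Int)) :
    q ∈ pvContrib xs (pvK xs q) := by
  by_cases hb : pvGet xs q.1 = pvGet xs q.2
  · have hK : pvK xs q = (pvGet xs q.2, pvGet xs q.2) := by
      unfold pvK; rw [hb, pvSortedPair_self]
    rw [hK]
    unfold pvContrib
    simp only [beq_self_eq_true, if_true]
    rw [pvMem_pvCombos' _ (pvPairwise_pvPosL' xs _)]
    refine ⟨?_, ?_, h1⟩
    · rw [pvMem_pvPosL']; exact ⟨h0, by omega, hb⟩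
    · rw [pvMem_pvPosL']; exact ⟨by omega, h2, rfl⟩
  · by_cases hle : pvGet xs q.1 ≤ pvGet xs q.2
    · have hK : pvK xs q = (pvGet xs q.1, pvGet xs q.2) := by
        unfold pvK pvSortedPair; rw [if_pos hle]
      rw [hK]
      unfold pvContrib
      rw [if_neg (by simpa using hb)]
      unfold pvCross
      refine List.mem_flatMap.mpr ⟨q.1, ?_, List.mem_map.mpr ⟨q.2, ?_, ?_⟩⟩
      · rw [pvMem_pvPosL']; exact ⟨h0, by omega, rfl⟩
      · rw [pvMem_pvPosL']; exact ⟨by omega, h2, rfl⟩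
      · rw [min_eq_left h1.le, max_eq_right h1.le]
    · have hK : pvK xs q = (pvGet xs q.2, pvGet xs q.1) := by
        unfold pvK pvSortedPair; rw [if_neg hle]
      rw [hK]
      unfold pvContrib
      rw [if_neg (by simpa using fun e => hb e.symm)]
      unfold pvCross
      refine List.mem_flatMap.mpr ⟨q.2, ?_, List.mem_map.mpr ⟨q.1, ?_, ?_⟩⟩
      · rw [pvMem_pvPosL']; exact ⟨by omega, h2, rfl⟩
      · rw [pvMem_pvPosL']; exact ⟨h0, by omega, rfl⟩
      · rw [min_eq_right h1.le, max_eq_left h1.le]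

lemma pvMem_pvHits' (xs : List String) (cps : List (String × String)) (q : Int × Int) :
    q ∈ pvHits xs cps ↔ 0 ≤ q.1 ∧ q.1 < q.2 ∧ q.2 < (xs.length : Int) ∧ pvP xs cps q = true := by
  unfold pvHits
  rw [List.mem_flatMap]
  constructor
  · rintro ⟨p, hp, hq⟩
    obtain ⟨hpc, hple⟩ := (pvMem_pvUniq' cps p).mp hp
    obtain ⟨hk, hb0, hb1, hb2⟩ := pvKey_of_contrib' xs p hple q hq
    refine ⟨hb0, hb1, hb2, ?_⟩
    unfold pvP
    rw [hk]
    exact List.contains_iff_mem.mpr hpc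
  · rintro ⟨h0, h1, h2, hP⟩
    refine ⟨pvK xs q, ?_, pvMem_contrib_self' xs q h0 h1 h2⟩
    rw [pvMem_pvUniq']
    exact ⟨List.contains_iff_mem.mp hP, pvSortedPair_fst_le_snd' _ _⟩

lemma pvPairwise_pyRange' : ∀ (m : Nat) (a b : Int), (b - a).toNat = m →
    (PySem.List.pyRange a b).Pairwise (· < ·) := by
  intro m
  induction m with
  | zero =>
    intro a b h
    have : PySem.List.pyRange a b = [] := by
      refine List.eq_nil_iff_forall_not_mem.mpr (fun x hx => ?_)
      rw [PySem.List.mem_pyRange_one] at hx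
      omega
    rw [this]
    exact List.Pairwise.nil
  | succ m ih =>
    intro a b h
    rw [PySem.List.pyRange_one_cons (by omega)]
    refine List.Pairwise.cons (fun y hy => ?_) (ih (a + 1) b (by omega))
    rw [PySem.List.mem_pyRange_one] at hy
    omega

lemma pvPairwise_pvAP' (n : Nat) : (pvAP n).Pairwise (fun q r => toLex q < toLex r) := by
  unfold pvAP
  rw [List.pairwise_flatMap]
  constructor
  · intro i _
    refine List.pairwise_map.mpr (List.Pairwise.imp ?_ (pvPairwise_pyRange' _ _ _ rfl))
    intro j1 j2 h
    exact Prod.Lex.toLex_lt_toLex.mpr (Or.inr ⟨rfl, h⟩)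
  · refine List.Pairwise.imp ?_ (pvPairwise_pyRange' _ _ _ rfl)
    intro i1 i2 h x hx y hy
    obtain ⟨j1, _, rfl⟩ := List.mem_map.mp hx
    obtain ⟨j2, _, rfl⟩ := List.mem_map.mp hy
    exact Prod.Lex.toLex_lt_toLex.mpr (Or.inl h)

lemma pvMem_pvF' (xs : List String) (cps : List (String × String)) (q : Int × Int) :
    q ∈ pvF xs cps ↔ 0 ≤ q.1 ∧ q.1 < q.2 ∧ q.2 < (xs.length : Int) ∧ pvP xs cps q = true := by
  unfold pvF pvAP
  rw [List.mem_filter, List.mem_flatMap]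
  constructor
  · rintro ⟨⟨i, hi, hq⟩, hP⟩
    obtain ⟨j, hj, rfl⟩ := List.mem_map.mp hq
    rw [PySem.List.mem_pyRange_one] at hi hj
    exact ⟨by omega, by omega, by omega, hP⟩
  · rintro ⟨h0, h1, h2, hP⟩
    refine ⟨⟨q.1, ?_, List.mem_map.mpr ⟨q.2, ?_, rfl⟩⟩, hP⟩
    · rw [PySem.List.mem_pyRange_one]; omega
    · rw [PySem.List.mem_pyRange_one]; omega

lemma pvNodup_pvHits' (xs : List String) (cps : List (String × String)) : (pvHits xs cps).Nodup := by
  unfold pvHits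
  rw [List.nodup_flatMap]
  constructor
  · intro p hp
    unfold pvContrib
    by_cases hb : p.1 = p.2
    · simp only [hb, beq_self_eq_true, if_true]
      exact pvNodup_pvCombos' _ (pvPairwise_pvPosL' xs p.2)
    · simp only [beq_iff_eq, hb, if_false]
      refine pvNodup_pvCross' _ _ (pvNodup_pvPosL' xs p.1) (pvNodup_pvPosL' xs p.2) ?_
      intro i hi hib
      rw [pvMem_pvPosL'] at hi hib
      exact hb (hi.2.2.symm.trans hib.2.2)
  · refine List.Pairwise.imp_of_mem ?_ (PySem.List.nodup_dedup _)
    intro p1 p2 h1 h2 hne q hq1 hq2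
    have hle1 := ((pvMem_pvUniq' cps p1).mp h1).2
    have hle2 := ((pvMem_pvUniq' cps p2).mp h2).2
    have k1 := (pvKey_of_contrib' xs p1 hle1 q hq1).1
    have k2 := (pvKey_of_contrib' xs p2 hle2 q hq2).1
    exact hne (k1.symm.trans k2)


lemma pvPos_getD' (xs : List String) (a : String) :
    ((PySem.List.enumerate xs 0).foldl
      (fun d q => d.modify q.2 [] (fun l => l ++ [q.1])) PySem.Dict.empty).getD a []
    = pvPosL xs a := by
  have hswap : (PySem.List.enumerate xs 0).foldl
      (fun d q => d.modify q.2 [] (fun l => l ++ [q.1])) PySem.Dict.empty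
      = ((PySem.List.enumerate xs 0).map (fun q => (q.2, q.1))).foldl
          (fun d (p : String × Int) => d.modify p.1 [] (fun l => l ++ [p.2])) PySem.Dict.empty :=
    (List.foldl_map (f := fun q : Int × String => (q.2, q.1))
      (g := fun (d : PySem.Dict String (List Int)) (p : String × Int) => d.modify p.1 [] (fun l => l ++ [p.2]))).symm
  rw [hswap, PySem.Dict.getD_foldl_modify_append, PySem.Dict.getD_empty, List.nil_append,
    pvEnum_eq "" xs 0, List.map_map, List.filter_map, List.map_map]
  simp only [Function.comp_def]
  unfold pvPosL
  exact List.map_congr_left (fun k _ => by simp)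

lemma pvCombos_eq' (ps : List Int) :
    (PySem.List.enumerate ps 0).flatMap (fun ki =>
      (PySem.List.slice ps (some (ki.1 + 1)) none).map (fun j => (ki.2, j)))
    = pvCombos ps := by
  rw [pvEnum_eq 0 ps 0, List.flatMap_map]
  unfold pvCombos
  congr 1
  funext k
  rw [PySem.List.slice_from ps (by omega : (0:Int) ≤ 0 + (k:Int) + 1)]
  have h : ((0:Int) + (k:Int) + 1).toNat = k + 1 := by omega
  rw [h]

lemma pvA_eq' (xs : List String) (cps : List (String × String)) :
    check_conflicts xs cps = (pvF xs cps).map (pvFmtQ xs) := by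
  have hinner : ∀ (acc : List String) (i : Int),
      (PySem.List.pyRange (i + 1) (xs.length : Int)).foldl (fun out j =>
        if cps.contains (pvSortedPair (PySem.List.pyGetD xs i "") (PySem.List.pyGetD xs j "")) then
          out ++ [pvFmt (PySem.List.pyGetD xs i "") (PySem.List.pyGetD xs j "")] else out) acc
      = acc ++ ((PySem.List.pyRange (i + 1) (xs.length : Int)).filter (fun j => pvP xs cps (i, j))).map
          (fun j => pvFmtQ xs (i, j)) :=
    fun acc i => PySem.List.foldl_append_if (fun j => pvP xs cps (i, j)) (fun j => pvFmtQ xs (i, j)) _ acc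
  unfold check_conflicts
  simp only [hinner]
  rw [PySem.List.foldl_append_eq_flatMap, List.nil_append]
  unfold pvF pvAP
  rw [List.filter_flatMap, List.map_flatMap]
  congr 1
  funext i
  rw [List.filter_map, List.map_map]
  rfl

lemma pvB_eq' (xs : List String) (cps : List (String × String)) :
    check_conflicts_alt xs cps
    = (PySem.List.sorted (pvHits xs cps) (fun q => (toLex q : Lex (Int × Int)))).map (pvFmtQ xs) := by
  simp only [check_conflicts_alt]
  have hbody : ∀ (hits : List (Int × Int)) (p : String × String)
      (c1 c2 : List (Int × Int)),
      (if p.1 == p.2 then hits ++ c1 else hits ++ c2) = hits ++ (if p.1 == p.2 then c1 else c2) := by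
    intro hits p c1 c2; split_ifs <;> rfl
  simp only [hbody]
  rw [PySem.List.foldl_append_eq_flatMap, List.nil_append]
  have hfun : (fun (p : String × String) =>
      if p.1 == p.2 then
        (PySem.List.enumerate (((PySem.List.enumerate xs 0).foldl
            (fun d q => d.modify q.2 [] (fun l => l ++ [q.1])) PySem.Dict.empty).getD p.1 []) 0).flatMap
          (fun ki => (PySem.List.slice (((PySem.List.enumerate xs 0).foldl
            (fun d q => d.modify q.2 [] (fun l => l ++ [q.1])) PySem.Dict.empty).getD p.1 [])
            (some (ki.1 + 1)) none).map (fun j => (ki.2, j)))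
      else
        (((PySem.List.enumerate xs 0).foldl
            (fun d q => d.modify q.2 [] (fun l => l ++ [q.1])) PySem.Dict.empty).getD p.1 []).flatMap
          (fun i => (((PySem.List.enumerate xs 0).foldl
            (fun d q => d.modify q.2 [] (fun l => l ++ [q.1])) PySem.Dict.empty).getD p.2 []).map
            (fun j => (min i j, max i j))))
      = pvContrib xs := by
    funext p
    rw [pvPos_getD', pvPos_getD', pvCombos_eq']
    rfl
  rw [hfun]
  rfl

lemma pvPairwise_pvF' (xs : List String) (cps : List (String × String)) :
    (pvF xs cps).Pairwise (fun q r => toLex q < toLex r) := by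
  unfold pvF
  exact List.Pairwise.sublist List.filter_sublist (pvPairwise_pvAP' xs.length)

lemma pvNodup_of_pairwise_lex {l : List (Int × Int)}
    (h : l.Pairwise (fun q r => toLex q < toLex r)) : l.Nodup :=
  h.imp (fun hlt heq => by subst heq; exact lt_irrefl _ hlt)

lemma pvNodup_pvF' (xs : List String) (cps : List (String × String)) : (pvF xs cps).Nodup :=
  pvNodup_of_pairwise_lex (pvPairwise_pvF' xs cps)

lemma pvSorted_hits' (xs : List String) (cps : List (String × String)) :
    PySem.List.sorted (pvHits xs cps) (fun q => (toLex q : Lex (Int × Int))) = pvF xs cps := by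
  apply PySem.List.sorted_eq_of_perm_of_pairwise_lt
  · exact (List.perm_ext_iff_of_nodup (pvNodup_pvF' xs cps) (pvNodup_pvHits' xs cps)).mpr
      (fun q => (pvMem_pvF' xs cps q).trans (pvMem_pvHits' xs cps q).symm)
  · exact pvPairwise_pvF' xs cps

-- ===== VERDICT (by name: the statement is the Claim_ definition above) =====
theorem check_conflicts_spec : Claim_equal_check_conflicts := by
  intro xs cps _
  show check_conflicts xs cps = check_conflicts_alt xs cps
  rw [pvA_eq' xs cps, pvB_eq' xs cps, pvSorted_hits' xs cps]
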